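-- pv_equiv track=rewrite | github.com/Chaewon-Leee/STUDY-Programmers | 등수_매기기/yonggeun/yonggeun.py | solution
-- ===== SOURCE A (Python) =====
-- def solution(score):
--     student_score_sum = []
--     student_rank = []
--     for student in score:
--         student_sum = student[0] + student[1]
--         student_score_sum.append(student_sum)
--     student_reverse = sorted(student_score_sum, reverse=True)
--     for i in student_score_sum:
--         student_rank.append(student_reverse.index(i) + 1)
--     return student_rank
-- ===== SOURCE B (Python) =====
-- def solution(score):
--     sums = [s[0] + s[1] for s in score]
--     return [1 + sum(x > v for x in sums) for v in sums]
-- ===== Notes on version B (the rewrite author's own statement) =====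
-- stated objective: simpler
-- what changed: drops the sort entirely: each student's rank is computed directly as 1 plus the number of strictly greater sums, instead of locating the sum in a descending-sorted copy with .index
import Mathlib
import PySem

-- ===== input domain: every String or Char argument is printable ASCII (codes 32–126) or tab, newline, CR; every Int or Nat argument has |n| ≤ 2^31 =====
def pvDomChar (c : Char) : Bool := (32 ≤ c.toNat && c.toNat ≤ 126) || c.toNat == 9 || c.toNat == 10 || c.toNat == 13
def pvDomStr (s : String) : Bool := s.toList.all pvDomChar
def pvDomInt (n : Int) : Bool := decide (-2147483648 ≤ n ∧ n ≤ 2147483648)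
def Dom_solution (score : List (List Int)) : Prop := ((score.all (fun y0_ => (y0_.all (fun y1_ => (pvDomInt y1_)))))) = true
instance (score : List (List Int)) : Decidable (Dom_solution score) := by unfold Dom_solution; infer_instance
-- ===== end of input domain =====

-- B drops the sort entirely: each rank is 1 plus the number of strictly greater sums (simpler).

-- ===== PORT A =====
def solution (score : List (List Int)) : List Int :=
  let student_score_sum :=
    score.foldl (fun acc student =>
      acc ++ [PySem.List.pyGetD student 0 0 + PySem.List.pyGetD student 1 0]) []
  let student_reverse := PySem.List.sorted student_score_sum (fun x => x) true
  student_score_sum.foldl (fun acc i =>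
    acc ++ [(((PySem.List.index? student_reverse i).getD 0 : Nat) : Int) + 1]) []

-- ===== PORT B =====
def solution_alt (score : List (List Int)) : List Int :=
  let sums := score.map (fun s => PySem.List.pyGetD s 0 0 + PySem.List.pyGetD s 1 0)
  sums.map (fun v => 1 + ((sums.countP (fun x => decide (v < x)) : Nat) : Int))

-- ===== PRECONDITION & SPEC =====
-- Pre_ excludes exactly the inputs where Python A raises IndexError (an inner list with
-- fewer than two scores); B raises there too.
def Pre_solution (score : List (List Int)) : Prop := ∀ s ∈ score, 2 ≤ s.length
instance (score : List (List Int)) : Decidable (Pre_solution score) := by unfold Pre_solution; infer_instance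
def pvWitness_solution : List (List Int) := [[1, 2], [3, 4], [1, 2]]
def Spec_solution (score : List (List Int)) (out : List Int) : Prop := out = solution_alt score
instance (score : List (List Int)) (out : List Int) : Decidable (Spec_solution score out) := by unfold Spec_solution; infer_instance

-- ===== CLAIM (what is proved, stated in full; the proofs are below) =====
def Claim_equal_solution : Prop := ∀ (score : List (List Int)), Dom_solution score → Pre_solution score → Spec_solution score (solution score)

-- ===== LEMMAS AND PROOFS =====

-- in a descending-sorted list containing v, the index of v is the number of elements > v
lemma idx_eq_count (L : List Int) (v : Int)
    (hs : L.Pairwise (fun a b => b ≤ a)) (hv : v ∈ L) :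
    (((PySem.List.index? L v).getD 0 : Nat) : Int)
      = ((L.countP (fun x => decide (v < x)) : Nat) : Int) := by
  induction L with
  | nil => simp at hv
  | cons x t ih =>
    rcases List.pairwise_cons.1 hs with ⟨hxt, ht⟩
    by_cases hvx : v = x
    · subst hvx
      rw [PySem.List.index?_cons_self]
      have hc : t.countP (fun x => decide (v < x)) = 0 := by
        apply List.countP_eq_zero.2
        intro y hy
        have := hxt y hy
        simp; omega
      simp [hc]
    · have hvt : v ∈ t := by
        cases hv with
        | head => exact absurd rfl hvx
        | tail _ h => exact h
      have hvltx : v < x := lt_of_le_of_ne (hxt v hvt) hvx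
      rw [PySem.List.index?_cons_of_ne _ (fun he => hvx he.symm)]
      rcases Option.isSome_iff_exists.1 ((PySem.List.index?_isSome_iff t v).2 hvt) with ⟨k, hk⟩
      have := ih ht hvt
      rw [hk] at this ⊢
      simp [hvltx] at this ⊢
      omega

-- ===== VERDICT (by name: the statement is the Claim_ definition above) =====
theorem solution_spec : Claim_equal_solution := by
  intro score _ _
  show solution score = solution_alt score
  unfold solution solution_alt
  rw [PySem.List.foldl_append_singleton_eq_map, PySem.List.foldl_append_singleton_eq_map]
  simp only [List.nil_append]
  apply List.map_congr_left
  intro v hv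
  set sums := score.map (fun s => PySem.List.pyGetD s 0 0 + PySem.List.pyGetD s 1 0) with hsums
  have hvrev : v ∈ PySem.List.sorted sums (fun x => x) true := by
    rw [PySem.List.mem_sorted]; exact hv
  have hpw : (PySem.List.sorted sums (fun x => x) true).Pairwise (fun a b => b ≤ a) :=
    PySem.List.sorted_pairwise_rev sums (fun x => x)
  rw [idx_eq_count _ v hpw hvrev,
      (PySem.List.sorted_perm sums (fun x => x) true).countP_eq]
  ring
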